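-- pv_equiv track=rewrite | github.com/joazingue/DataScience_UnitI | DataWrangling/IO/PW_miniproject_exercises.py | get_practices_pc
-- ===== SOURCE A (Python) =====
-- def get_practices_pc(practices):
--     practice_postal = {}
--     for practice in practices:
--         if practice['code'] in practice_postal:
--             if practice_postal[practice['code']] > practice['post_code']:
--                 practice_postal[practice['code']] = practice['post_code']
--         else:
--             practice_postal[practice['code']] = practice['post_code']
--     return practice_postal
-- ===== SOURCE B (Python) =====
-- def get_practices_pc(practices):
--     groups = {}
--     for practice in practices:
--         groups.setdefault(practice['code'], []).append(practice['post_code'])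
--     return {code: min(pcs) for code, pcs in groups.items()}
-- ===== Notes on version B (the rewrite author's own statement) =====
-- stated objective: alternative
-- what changed: Replaces the single-pass running-minimum update with group-then-reduce: one pass groups each practice's post_code under its code in a dict of lists, a second pass maps each code to min() of its group.
import Mathlib
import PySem

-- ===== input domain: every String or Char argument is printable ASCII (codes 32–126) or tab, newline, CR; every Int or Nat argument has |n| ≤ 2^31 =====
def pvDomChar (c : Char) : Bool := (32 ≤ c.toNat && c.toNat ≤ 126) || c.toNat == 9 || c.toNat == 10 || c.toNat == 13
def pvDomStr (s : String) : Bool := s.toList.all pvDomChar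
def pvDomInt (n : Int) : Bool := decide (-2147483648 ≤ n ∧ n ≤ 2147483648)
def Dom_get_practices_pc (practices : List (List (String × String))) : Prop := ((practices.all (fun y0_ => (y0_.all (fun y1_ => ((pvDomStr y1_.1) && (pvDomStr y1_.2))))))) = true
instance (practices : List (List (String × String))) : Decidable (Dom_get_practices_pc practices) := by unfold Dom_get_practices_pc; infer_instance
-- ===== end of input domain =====

-- B replaces A's single-pass running-minimum dict update with a group-then-reduce decomposition
-- (group post_codes per code, then take min of each group); same asymptotic cost, different structure.


-- ===== PORT A =====
-- practice['k']: first-match lookup in the association-list dict; the "" default is reached only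
-- outside Pre_ (where the Python raises KeyError), so nothing is claimed about it there.
def pvGet (p : List (String × String)) (k : String) : String :=
  ((p.find? (fun q => q.1 == k)).map (·.2)).getD ""

def get_practices_pc (practices : List (List (String × String))) : List (String × String) :=
  (practices.foldl (fun d practice =>
      let c := pvGet practice "code"
      if d.contains c then
        (if pvGet practice "post_code" < d.getD c "" then d.insert c (pvGet practice "post_code") else d)
      else d.insert c (pvGet practice "post_code")) PySem.Dict.empty).items

-- ===== PORT B =====
def get_practices_pc_alt (practices : List (List (String × String))) : List (String × String) :=
  let groups : PySem.Dict String (List String) :=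
    practices.foldl (fun g practice =>
      g.modify (pvGet practice "code") [] (· ++ [pvGet practice "post_code"])) PySem.Dict.empty
  (groups.items.foldl (fun d q => d.insert q.1 ((PySem.List.min? q.2 (fun x => x)).getD "")) PySem.Dict.empty).items

-- ===== PRECONDITION & SPEC =====
-- Pre_ excludes exactly the inputs where the Python A raises KeyError: a practice dict
-- missing the key 'code' or 'post_code'.
def Pre_get_practices_pc (practices : List (List (String × String))) : Prop :=
  practices.all (fun p => p.any (fun q => q.1 == "code") && p.any (fun q => q.1 == "post_code")) = true
instance (practices : List (List (String × String))) : Decidable (Pre_get_practices_pc practices) := by unfold Pre_get_practices_pc; infer_instance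
def pvWitness_get_practices_pc : (List (List (String × String))) :=
  [[("code", "A1"), ("post_code", "X2")], [("code", "A1"), ("post_code", "B7")]]

def Spec_get_practices_pc (practices : List (List (String × String))) (out : List (String × String)) : Prop := out = get_practices_pc_alt practices
instance (practices : List (List (String × String))) (out : List (String × String)) : Decidable (Spec_get_practices_pc practices out) := by unfold Spec_get_practices_pc; infer_instance

-- ===== CLAIM (what is proved, stated in full; the proofs are below) =====
def Claim_equal_get_practices_pc : Prop := ∀ (practices : List (List (String × String))), Dom_get_practices_pc practices → Pre_get_practices_pc practices → Spec_get_practices_pc practices (get_practices_pc practices)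

-- ===== LEMMAS AND PROOFS =====
-- the common model: each first-seen code, mapped to the minimum of its post_codes
def pvCode (p : List (String × String)) : String := pvGet p "code"
def pvPost (p : List (String × String)) : String := pvGet p "post_code"
def pvPosts (c : String) (l : List (List (String × String))) : List String :=
  (l.filter (fun p => pvCode p == c)).map pvPost
def pvModel (l : List (List (String × String))) : List (String × String) :=
  (PySem.Set.ofList (l.map pvCode)).map (fun c => (c, (PySem.List.min? (pvPosts c l) (fun x => x)).getD ""))

theorem groups_getD (l : List (List (String × String))) (g : PySem.Dict String (List String)) (c : String) :
    (l.foldl (fun g practice =>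
      g.modify (pvGet practice "code") [] (· ++ [pvGet practice "post_code"])) g).getD c []
    = g.getD c [] ++ pvPosts c l := by
  induction l generalizing g with
  | nil => simp [pvPosts]
  | cons p t ih =>
    simp only [List.foldl_cons, ih, pvPosts, List.filter_cons, pvCode]
    by_cases h : pvGet p "code" = c
    · simp [h, pvPost]
    · simp [PySem.Dict.getD_modify, h, Ne.symm h]

theorem b_items (l : List (List (String × String))) :
    get_practices_pc_alt l = pvModel l := by
  unfold get_practices_pc_alt
  set groups := l.foldl (fun g practice =>
      g.modify (pvGet practice "code") [] (· ++ [pvGet practice "post_code"])) PySem.Dict.empty with hg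
  have hkeys : groups.keys = PySem.Set.ofList (l.map pvCode) := by
    rw [hg, PySem.Dict.keys_foldl_modify_key]
    rw [show PySem.Dict.empty.keys = ([] : List String) from rfl, PySem.Set.update_nil_left]
    rfl
  have hnd : groups.keys.Nodup := by rw [hkeys]; exact PySem.Set.nodup_ofList _
  have hitems : groups.items = groups.keys.map (fun c => (c, groups.getD c [])) :=
    PySem.Dict.items_eq_map_keys groups hnd []
  have hfresh : (groups.items.foldl (fun d q => d.insert q.1 ((PySem.List.min? q.2 (fun x => x)).getD "")) PySem.Dict.empty).items
      = PySem.Dict.empty.items ++ groups.items.map (fun q => (q.1, (PySem.List.min? q.2 (fun x => x)).getD "")) := by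
    exact PySem.Dict.items_foldl_insert_fresh (k := fun q => q.1)
      (v := fun q => (PySem.List.min? q.2 (fun x => x)).getD "") (d := PySem.Dict.empty)
      (l := groups.items) (by simp [PySem.Dict.contains_empty]) (by simpa [PySem.Dict.keys] using hnd)
  rw [hfresh, hitems]
  simp only [PySem.Dict.empty, List.nil_append, List.map_map]
  rw [hkeys]
  unfold pvModel
  apply List.map_congr_left
  intro c hc
  simp only [Function.comp]
  congr 1
  rw [groups_getD]
  simp [PySem.Dict.getD_empty]

theorem posts_append (c : String) (l : List (List (String × String))) (p : List (String × String)) :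
    pvPosts c (l ++ [p]) = pvPosts c l ++ (if pvCode p = c then [pvPost p] else []) := by
  simp [pvPosts, List.filter_append]
  by_cases h : pvCode p = c <;> simp [h]

theorem posts_ne_nil (c : String) (l : List (List (String × String))) (h : c ∈ l.map pvCode) :
    pvPosts c l ≠ [] := by
  obtain ⟨p, hp, hc⟩ := List.mem_map.mp h
  simp only [pvPosts, ne_eq, List.map_eq_nil_iff, List.filter_eq_nil_iff]
  intro hall
  exact absurd (by simp [hc]) (hall p hp)

theorem min_append_singleton (xs : List String) (y : String) (hxs : xs ≠ []) :
    (PySem.List.min? (xs ++ [y]) (fun x => x)).getD ""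
      = min ((PySem.List.min? xs (fun x => x)).getD "") y := by
  obtain ⟨x, t, rfl⟩ := List.exists_cons_of_ne_nil hxs
  rw [show (x :: t) ++ [y] = x :: (t ++ [y]) from rfl,
      PySem.List.min?_id_cons, PySem.List.min?_id_cons]
  simp [List.foldl_append]

theorem a_items (l : List (List (String × String))) :
    (l.foldl (fun d practice =>
      let c := pvGet practice "code"
      if d.contains c then
        (if pvGet practice "post_code" < d.getD c "" then d.insert c (pvGet practice "post_code") else d)
      else d.insert c (pvGet practice "post_code")) PySem.Dict.empty).items = pvModel l := by
  induction l using List.reverseRecOn with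
  | nil => rfl
  | append_singleton l p ih =>
    rw [List.foldl_append, List.foldl_cons, List.foldl_nil]
    set d := l.foldl (fun d practice =>
      let c := pvGet practice "code"
      if d.contains c then
        (if pvGet practice "post_code" < d.getD c "" then d.insert c (pvGet practice "post_code") else d)
      else d.insert c (pvGet practice "post_code")) PySem.Dict.empty with hd
    show (if d.contains (pvCode p) = true
        then (if pvPost p < d.getD (pvCode p) "" then d.insert (pvCode p) (pvPost p) else d)
        else d.insert (pvCode p) (pvPost p)).items = pvModel (l ++ [p])
    have hkeys : d.keys = PySem.Set.ofList (l.map pvCode) := by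
      show d.items.map (·.1) = _
      rw [ih]; unfold pvModel; simp [Function.comp_def]
    have hnd : d.keys.Nodup := by rw [hkeys]; exact PySem.Set.nodup_ofList _
    have hcont : d.contains (pvCode p) = decide (pvCode p ∈ l.map pvCode) := by
      rw [PySem.Dict.contains_eq_decide_mem_keys, hkeys]
      simp [PySem.Set.mem_ofList]
    have hmodel : pvModel (l ++ [p])
        = (PySem.Set.ofList (l.map pvCode ++ [pvCode p])).map
            (fun c => (c, (PySem.List.min? (pvPosts c (l ++ [p])) (fun x => x)).getD "")) := by
      simp [pvModel]
    by_cases hmem : pvCode p ∈ l.map pvCode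
    · -- existing code: key set unchanged
      have hset : PySem.Set.ofList (l.map pvCode ++ [pvCode p]) = PySem.Set.ofList (l.map pvCode) := by
        rw [PySem.Set.ofList_append_singleton, PySem.Set.add_of_mem]
        rwa [PySem.Set.mem_ofList]
      have hmin : d.getD (pvCode p) ""
          = (PySem.List.min? (pvPosts (pvCode p) l) (fun x => x)).getD "" := by
        have hm : (pvCode p, (PySem.List.min? (pvPosts (pvCode p) l) (fun x => x)).getD "") ∈ d.items := by
          rw [ih, pvModel]
          exact List.mem_map.mpr ⟨pvCode p, by rwa [PySem.Set.mem_ofList], rfl⟩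
        exact PySem.Dict.getD_of_mem_items _ hm hnd ""
      have hpoint : ∀ c ∈ PySem.Set.ofList (l.map pvCode), c ≠ pvCode p →
          (PySem.List.min? (pvPosts c (l ++ [p])) (fun x => x)).getD ""
            = (PySem.List.min? (pvPosts c l) (fun x => x)).getD "" := by
        intro c _ hne
        rw [posts_append]
        simp [Ne.symm hne]
      have hccase : (PySem.List.min? (pvPosts (pvCode p) (l ++ [p])) (fun x => x)).getD ""
          = min ((PySem.List.min? (pvPosts (pvCode p) l) (fun x => x)).getD "") (pvPost p) := by
        rw [posts_append, if_pos rfl]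
        exact min_append_singleton _ _ (posts_ne_nil _ _ hmem)
      have hcT : d.contains (pvCode p) = true := by rw [hcont]; simpa using hmem
      rw [if_pos hcT]
      by_cases hlt : pvPost p < d.getD (pvCode p) ""
      · rw [if_pos hlt]
        rw [PySem.Dict.items_insert_of_contains _ _ hcT]
        rw [ih, hmodel, hset, pvModel, List.map_map]
        apply List.map_congr_left
        intro c hc
        by_cases hcp : c = pvCode p
        · subst hcp
          simp only [Function.comp, beq_self_eq_true, if_pos]
          rw [hccase]
          have hlt' : pvPost p < (PySem.List.min? (pvPosts (pvCode p) l) fun x => x).getD "" := by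
            rw [← hmin]; exact hlt
          rw [min_eq_right (le_of_lt hlt')]
        · simp only [Function.comp]
          rw [hpoint c hc hcp]
          simp [show (c == pvCode p) = false by simpa using hcp]
      · rw [if_neg hlt]
        rw [ih, hmodel, hset, pvModel]
        apply List.map_congr_left
        intro c hc
        by_cases hcp : c = pvCode p
        · subst hcp
          rw [hccase]
          have hle : (PySem.List.min? (pvPosts (pvCode p) l) fun x => x).getD "" ≤ pvPost p := by
            rw [← hmin]; exact not_lt.mp hlt
          rw [min_eq_left hle]
        · rw [hpoint c hc hcp]
    · -- fresh code: appended
      have hset : PySem.Set.ofList (l.map pvCode ++ [pvCode p])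
          = PySem.Set.ofList (l.map pvCode) ++ [pvCode p] := by
        rw [PySem.Set.ofList_append_singleton, PySem.Set.add_of_not_mem]
        rwa [PySem.Set.mem_ofList]
      have hcF : d.contains (pvCode p) = false := by rw [hcont]; simpa using hmem
      rw [if_neg (by simp [hcF])]
      rw [PySem.Dict.items_insert_of_not_contains _ _ hcF]
      rw [ih, hmodel, hset, List.map_append, pvModel]
      congr 1
      · apply List.map_congr_left
        intro c hc
        have hcp : c ≠ pvCode p := by
          intro h; subst h; exact hmem ((PySem.Set.mem_ofList _ _).mp hc)
        rw [posts_append]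
        simp [Ne.symm hcp]
      · have hnil : pvPosts (pvCode p) l = [] := by
          simp only [pvPosts, List.map_eq_nil_iff, List.filter_eq_nil_iff]
          intro q hq hbeq
          exact hmem (List.mem_map.mpr ⟨q, hq, by simpa using hbeq⟩)
        simp [posts_append, hnil, PySem.List.min?_id_cons]

-- ===== VERDICT (by name: the statement is the Claim_ definition above) =====
theorem get_practices_pc_spec : Claim_equal_get_practices_pc := by
  intro practices _ _
  unfold Spec_get_practices_pc get_practices_pc
  rw [a_items, b_items]
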